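-- pv_equiv track=rewrite | github.com/IronMan61693/MultiprocessingPermutationPython | processing_permutations.py | divideNumberListPermutations
-- ===== SOURCE A (Python) =====
-- def divideNumberListPermutations(numberList, processCount):
-- 	"""
-- 	Given a minimum number, maximum number and the number of processes, divide the
-- 	 input up into even (as even as possible) chunks.
--
-- 	Input:  numberMin <int>
-- 			numberMax <int>
-- 			process count <int>
-- 	Output: list of sub-lists [sub-list [<int>]]
-- 	"""
-- 	numberMinList = sorted(numberList)
-- 	numberMaxList = sorted(numberList, reverse = True)
--
-- 	numberMin = int("".join(str(x) for x in numberMinList))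
-- 	numberMax = int("".join(str(x) for x in numberMaxList))
--
-- 	# Calculate the index step size. Make sure the step is at least 1.
-- 	inputRange = numberMax - numberMin
-- 	step = max(1, inputRange // processCount)
--
-- 	# If there are too many processes, reduce the number of processes to the number of input values
-- 	processCount = min(processCount, inputRange)
--
-- 	# A list of the minimum and maximum number to find permutations for from the input numbers
-- 	outputList = []
--
-- 	# Go through each process number
-- 	for number in range(processCount):
-- 		# This holds the respective minimum(first index) and maximum(last index) numbers for each chunk
-- 		listMinMax = []
--
-- 		# Calculate the "first" index for this process
-- 		fIndex = number * step + numberMin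
--
-- 		# Calculate the last index. If it's the last process, set the last index to the length of the input list.
-- 		if (number < processCount - 1):
-- 			lIndex = (number + 1) * step + numberMin
--
-- 		else:
-- 			lIndex = numberMax
--
-- 		# This maxes the 0 element the minimum number checked by the process and
-- 		# the 1 element the max number
-- 		listMinMax.append(fIndex)
-- 		listMinMax.append(lIndex)
--
-- 		# Append the chunk to the output list
-- 		outputList.append(listMinMax)
--
-- 	return outputList
-- ===== SOURCE B (Python) =====
-- def divideNumberListPermutations(numberList, processCount):
-- 	# Builds the chunk list BACK-TO-FRONT: start from the final chunk ending at
-- 	# numberMax and walk a descending cursor, appending each earlier chunk, then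
-- 	# reverse once at the end; no per-iteration index arithmetic or branch.
-- 	numberMin = int("".join(str(x) for x in sorted(numberList)))
-- 	numberMax = int("".join(str(x) for x in sorted(numberList, reverse=True)))
--
-- 	inputRange = numberMax - numberMin
-- 	step = max(1, inputRange // processCount)
-- 	n = min(processCount, inputRange)
-- 	if n <= 0:
-- 		return []
--
-- 	hi = numberMin + (n - 1) * step
-- 	rev = [[hi, numberMax]]
-- 	for _ in range(n - 1):
-- 		rev.append([hi - step, hi])
-- 		hi -= step
-- 	rev.reverse()
-- 	return rev
-- ===== Notes on version B (the rewrite author's own statement) =====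
-- stated objective: alternative
-- what changed: Replaces A's forward loop that recomputes each chunk's endpoints from the index with an in-loop last-chunk branch by a back-to-front construction: start from the final chunk ending at numberMax, walk a descending cursor appending earlier chunks, and reverse once at the end.
import Mathlib
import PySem

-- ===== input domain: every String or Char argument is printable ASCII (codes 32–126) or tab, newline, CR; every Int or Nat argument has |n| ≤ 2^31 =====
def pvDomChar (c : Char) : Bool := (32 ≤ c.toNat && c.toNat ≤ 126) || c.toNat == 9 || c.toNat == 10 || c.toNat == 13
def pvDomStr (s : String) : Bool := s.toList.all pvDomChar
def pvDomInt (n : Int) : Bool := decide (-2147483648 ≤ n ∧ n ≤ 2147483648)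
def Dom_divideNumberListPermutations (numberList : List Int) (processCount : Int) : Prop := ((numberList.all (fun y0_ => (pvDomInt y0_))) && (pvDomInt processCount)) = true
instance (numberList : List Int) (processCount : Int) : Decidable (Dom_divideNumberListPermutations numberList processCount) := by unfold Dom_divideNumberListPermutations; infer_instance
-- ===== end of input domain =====

-- B builds the chunk list back-to-front with a descending cursor and one final
-- reverse, instead of A's forward loop recomputing indices with a last-chunk
-- branch; objective: alternative (same cost, different construction order).

-- ===== PORT A =====
def divideNumberListPermutations (numberList : List Int) (processCount : Int) : List (List Int) :=
  let numberMinList := PySem.List.sorted numberList (fun x => x) false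
  let numberMaxList := PySem.List.sorted numberList (fun x => x) true
  -- int("".join(str(x) for x in …)); Pre_ guarantees the parse succeeds (the .getD 0 default is unreachable)
  let numberMin := (PySem.Int.ofChars? (PySem.Chars.join [] (numberMinList.map (fun x => PySem.Int.toChars x)))).getD 0
  let numberMax := (PySem.Int.ofChars? (PySem.Chars.join [] (numberMaxList.map (fun x => PySem.Int.toChars x)))).getD 0
  let inputRange := numberMax - numberMin
  -- Pre_ guarantees processCount ≠ 0 (Python raises ZeroDivisionError there)
  let step := max 1 (PySem.Int.floordiv inputRange processCount)
  let processCount2 := min processCount inputRange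
  (PySem.List.pyRange 0 processCount2 1).foldl (fun outputList number =>
    let listMinMax : List Int := []
    let fIndex := number * step + numberMin
    let lIndex := if number < processCount2 - 1 then (number + 1) * step + numberMin else numberMax
    let listMinMax := listMinMax ++ [fIndex]
    let listMinMax := listMinMax ++ [lIndex]
    outputList ++ [listMinMax]) []

-- ===== PORT B =====
def divideNumberListPermutations_alt (numberList : List Int) (processCount : Int) : List (List Int) :=
  let numberMin := (PySem.Int.ofChars? (PySem.Chars.join [] ((PySem.List.sorted numberList (fun x => x) false).map (fun x => PySem.Int.toChars x)))).getD 0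
  let numberMax := (PySem.Int.ofChars? (PySem.Chars.join [] ((PySem.List.sorted numberList (fun x => x) true).map (fun x => PySem.Int.toChars x)))).getD 0
  let inputRange := numberMax - numberMin
  let step := max 1 (PySem.Int.floordiv inputRange processCount)
  let n := min processCount inputRange
  if n ≤ 0 then []
  else
    let hi := numberMin + (n - 1) * step
    let st := (PySem.List.pyRange 0 (n - 1) 1).foldl
      (fun (acc : List (List Int) × Int) _ => (acc.1 ++ [[acc.2 - step, acc.2]], acc.2 - step))
      ([[hi, numberMax]], hi)
    st.1.reverse

-- ===== PRECONDITION & SPEC =====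
-- Pre_ is exactly A's success set: processCount = 0 raises ZeroDivisionError; an empty
-- list raises ValueError on int(""); a list of ≥ 2 elements containing a negative number
-- produces a non-numeric join (e.g. "5-3") and raises ValueError.
def Pre_divideNumberListPermutations (numberList : List Int) (processCount : Int) : Prop :=
  processCount ≠ 0 ∧ numberList ≠ [] ∧ (numberList.length = 1 ∨ ∀ x ∈ numberList, 0 ≤ x)
instance (numberList : List Int) (processCount : Int) : Decidable (Pre_divideNumberListPermutations numberList processCount) := by unfold Pre_divideNumberListPermutations; infer_instance

def pvWitness_divideNumberListPermutations : List Int × Int := ([3, 1, 2], 2)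

def Spec_divideNumberListPermutations (numberList : List Int) (processCount : Int) (out : List (List Int)) : Prop := out = divideNumberListPermutations_alt numberList processCount
instance (numberList : List Int) (processCount : Int) (out : List (List Int)) : Decidable (Spec_divideNumberListPermutations numberList processCount out) := by unfold Spec_divideNumberListPermutations; infer_instance

-- ===== CLAIM (what is proved, stated in full; the proofs are below) =====
def Claim_equal_divideNumberListPermutations : Prop := ∀ (numberList : List Int) (processCount : Int), Dom_divideNumberListPermutations numberList processCount → Pre_divideNumberListPermutations numberList processCount → Spec_divideNumberListPermutations numberList processCount (divideNumberListPermutations numberList processCount)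

-- ===== LEMMAS AND PROOFS =====

-- B's cursor fold, characterised: folding k times from (lst, hi) appends the k
-- descending chunks and leaves the cursor at hi - k*s (the fold ignores elements).
theorem revfold (s : Int) (l : List Int) (lst : List (List Int)) (hi : Int) :
    l.foldl (fun (acc : List (List Int) × Int) _ => (acc.1 ++ [[acc.2 - s, acc.2]], acc.2 - s)) (lst, hi)
    = (lst ++ (List.range l.length).map (fun (j : Nat) => [hi - ((j : Int) + 1) * s, hi - (j : Int) * s]),
       hi - (l.length : Int) * s) := by
  induction l generalizing lst hi with
  | nil => simp
  | cons a t ih =>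
    rw [List.foldl_cons, ih]
    simp only [Prod.mk.injEq, List.length_cons]
    constructor
    · rw [List.append_assoc]
      congr 1
      rw [List.range_succ_eq_map, List.map_cons, List.map_map, List.singleton_append]
      congr 1
      · norm_num
      · apply List.map_congr_left
        intro j _
        simp only [Function.comp]
        push_cast
        rw [List.cons.injEq, List.cons.injEq]
        exact ⟨by ring, by ring, rfl⟩
    · push_cast; ring

-- The core fact: A's forward fold equals B's reversed back-to-front construction,
-- for ANY numberMin m, numberMax M, step s and clamped process count pc.
theorem chunks_eq (m M s pc : Int) :
    (PySem.List.pyRange 0 pc 1).foldl (fun outputList number =>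
        outputList ++ [[number * s + m,
          if number < pc - 1 then (number + 1) * s + m else M]]) []
    = if pc ≤ 0 then []
      else
        (((PySem.List.pyRange 0 (pc - 1) 1).foldl
          (fun (acc : List (List Int) × Int) _ => (acc.1 ++ [[acc.2 - s, acc.2]], acc.2 - s))
          ([[m + (pc - 1) * s, M]], m + (pc - 1) * s)).1).reverse := by
  rw [PySem.List.foldl_append_singleton_eq_map, List.nil_append]
  by_cases hpc : pc ≤ 0
  · simp [hpc, PySem.List.pyRange_one_eq_nil hpc]
  · simp only [hpc, if_false]
    rw [revfold]
    have hlen : (PySem.List.pyRange 0 (pc - 1) 1).length = (pc - 1).toNat := by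
      simp [PySem.List.length_pyRange_one]
    rw [hlen]
    set t := pc.toNat with ht
    have hk : (pc - 1).toNat = t - 1 := by omega
    have ht1 : 1 ≤ t := by omega
    rw [hk]
    set L : List (List Int) := [[m + (pc - 1) * s, M]] ++
      (List.range (t - 1)).map (fun (j : Nat) =>
        [m + (pc - 1) * s - ((j : Int) + 1) * s, m + (pc - 1) * s - (j : Int) * s]) with hL
    have hlen2 : L.length = t := by simp [hL]; omega
    apply List.ext_getElem?
    intro i
    by_cases hib : i < t
    · have h1 : i < (PySem.List.pyRange 0 pc 1).length := by
        simp [PySem.List.length_pyRange_one]; omega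
      rw [List.getElem?_map, List.getElem?_eq_getElem h1, PySem.List.getElem_pyRange_one]
      rw [List.getElem?_reverse (by omega : i < L.length)]
      rw [hlen2]
      by_cases hlast : i = t - 1
      · have h0 : t - 1 - i = 0 := by omega
        rw [h0, hL]
        rw [List.getElem?_append_left (by simp)]
        simp only [List.getElem?_cons_zero, Option.map_some, Option.some.injEq]
        have hc : ¬ ((0 : Int) + (i : Int) < pc - 1) := by omega
        rw [if_neg hc]
        have hicast : ((i : Int)) = pc - 1 := by omega
        rw [List.cons.injEq]
        exact ⟨by rw [hicast]; ring, rfl⟩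
      · have hi' : i < t - 1 := by omega
        have h0 : t - 1 - i = 1 + (t - 2 - i) := by omega
        rw [h0, hL]
        rw [List.getElem?_append_right (by simp : ([[m + (pc - 1) * s, M]] : List (List Int)).length ≤ 1 + (t - 2 - i))]
        simp only [List.length_singleton, Nat.add_sub_cancel_left]
        rw [List.getElem?_map]
        rw [List.getElem?_eq_getElem (by simp; omega : t - 2 - i < (List.range (t - 1)).length)]
        simp only [List.getElem_range, Option.map_some, Option.some.injEq]
        have hc : ((0 : Int) + (i : Int) < pc - 1) := by omega
        rw [if_pos hc]
        have hj : ((t - 2 - i : Nat) : Int) = pc - 2 - i := by omega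
        rw [List.cons.injEq]
        refine ⟨by rw [hj]; ring, ?_⟩
        rw [List.cons.injEq]
        exact ⟨by rw [hj]; ring, rfl⟩
    · rw [List.getElem?_eq_none, List.getElem?_eq_none]
      · rw [List.length_reverse, hlen2]; omega
      · simp [PySem.List.length_pyRange_one]; omega

-- ===== VERDICT (by name: the statement is the Claim_ definition above) =====
theorem divideNumberListPermutations_spec : Claim_equal_divideNumberListPermutations := by
  intro numberList processCount _ _
  unfold Spec_divideNumberListPermutations divideNumberListPermutations divideNumberListPermutations_alt
  dsimp only
  simp only [List.nil_append, List.singleton_append]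
  rw [chunks_eq]
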